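-- pv_equiv track=rewrite | github.com/ristik/rugregator | ndsmt3.py | _first_split
-- ===== SOURCE A (Python) =====
-- def _first_split(keys, start_bit):
--     """First bit >= start_bit where the sorted keys disagree."""
--     result = None
--     for i in range(len(keys) - 1):
--         xor = (keys[i] ^ keys[i + 1]) >> start_bit
--         if xor:
--             pos = start_bit + (xor & -xor).bit_length() - 1
--             if result is None or pos < result:
--                 result = pos
--     return result
-- ===== SOURCE B (Python) =====
-- def _first_split(keys, start_bit):
--     """First bit >= start_bit where the sorted keys disagree."""
--     acc = 0
--     for lo, hi in zip(keys, keys[1:]):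
--         acc |= (lo ^ hi) >> start_bit
--     if acc == 0:
--         return None
--     return start_bit + (acc & -acc).bit_length() - 1
-- ===== Notes on version B (the rewrite author's own statement) =====
-- stated objective: alternative
-- what changed: B replaces A's per-pair lowest-set-bit computation and running-minimum tracking by OR-ing all shifted adjacent XORs into one bitmask accumulator and extracting the lowest set bit once after the loop (the lowest set bit of the OR equals the minimum of the pairs' lowest set bits).
import Mathlib
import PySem

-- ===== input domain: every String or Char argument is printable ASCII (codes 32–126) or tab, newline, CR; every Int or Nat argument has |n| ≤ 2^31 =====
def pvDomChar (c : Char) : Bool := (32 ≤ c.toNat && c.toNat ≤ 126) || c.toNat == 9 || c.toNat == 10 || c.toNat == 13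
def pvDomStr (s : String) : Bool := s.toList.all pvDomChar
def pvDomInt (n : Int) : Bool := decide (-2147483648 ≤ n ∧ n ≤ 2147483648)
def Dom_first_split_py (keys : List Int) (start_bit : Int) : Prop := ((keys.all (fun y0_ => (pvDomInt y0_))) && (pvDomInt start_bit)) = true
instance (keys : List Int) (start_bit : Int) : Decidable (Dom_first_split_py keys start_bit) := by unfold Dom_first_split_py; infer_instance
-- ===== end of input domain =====

-- B replaces A's per-pair lowest-set-bit extraction and running-minimum by a single OR
-- bitmask accumulator with one lowest-set-bit extraction after the loop (alternative
-- decomposition, same O(n) cost).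

-- ===== PORT A =====
def first_split_py (keys : List Int) (start_bit : Int) : Option Int :=
  (PySem.List.pyRange 0 (PySem.List.len keys - 1)).foldl
    (fun result i =>
      let xor := PySem.Int.bxor (PySem.List.pyGetD keys i 0) (PySem.List.pyGetD keys (i + 1) 0) >>> start_bit.toNat
      if xor ≠ 0 then
        let pos := start_bit + (PySem.Int.bitLength (PySem.Int.band xor (-xor)) : Int) - 1
        match result with
        | none => some pos
        | some r => if pos < r then some pos else some r
      else result)
    none

-- ===== PORT B =====
def first_split_py_alt (keys : List Int) (start_bit : Int) : Option Int :=
  let acc := (keys.zip (PySem.List.slice keys (some 1) none)).foldl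
    (fun acc p => PySem.Int.bor acc (PySem.Int.bxor p.1 p.2 >>> start_bit.toNat)) 0
  if acc = 0 then none
  else some (start_bit + (PySem.Int.bitLength (PySem.Int.band acc (-acc)) : Int) - 1)

-- ===== PRECONDITION & SPEC =====
-- Pre_ excludes only inputs where Python raises: with at least two keys and a negative
-- start_bit, `>> start_bit` raises ValueError (with ≤ 1 keys the loop body never runs).
def Pre_first_split_py (keys : List Int) (start_bit : Int) : Prop :=
  keys.length ≤ 1 ∨ 0 ≤ start_bit
instance (keys : List Int) (start_bit : Int) : Decidable (Pre_first_split_py keys start_bit) := by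
  unfold Pre_first_split_py; infer_instance
def pvWitness_first_split_py : List Int × Int := ([0, 5], 1)

def Spec_first_split_py (keys : List Int) (start_bit : Int) (out : Option Int) : Prop := out = first_split_py_alt keys start_bit
instance (keys : List Int) (start_bit : Int) (out : Option Int) : Decidable (Spec_first_split_py keys start_bit out) := by unfold Spec_first_split_py; infer_instance

-- ===== CLAIM (what is proved, stated in full; the proofs are below) =====
def Claim_equal_first_split_py : Prop := ∀ (keys : List Int) (start_bit : Int), Dom_first_split_py keys start_bit → Pre_first_split_py keys start_bit → Spec_first_split_py keys start_bit (first_split_py keys start_bit)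

-- ===== LEMMAS AND PROOFS =====

-- ---- Nat-level bit lemmas ----
theorem natAnd2 (a b : Nat) : (a &&& b) % 2 = a % 2 * (b % 2) := by
  have h := Nat.testBit_and a b 0
  simp only [Nat.testBit_zero] at h
  have key : ((a &&& b) % 2 = 1) ↔ ((a % 2 = 1) ∧ (b % 2 = 1)) := by
    have h' : (decide ((a &&& b) % 2 = 1) = true) ↔ ((decide (a % 2 = 1) && decide (b % 2 = 1)) = true) := by rw [h]
    simpa using h'
  have h1 := Nat.mod_two_eq_zero_or_one (a &&& b)
  by_cases hc : (a &&& b) % 2 = 1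
  · have h2 := key.mp hc
    rw [h2.1, h2.2]
    omega
  · have h3 : ¬ (a % 2 = 1 ∧ b % 2 = 1) := fun hx => hc (key.mpr hx)
    rcases Nat.mod_two_eq_zero_or_one a with ha | ha <;>
      rcases Nat.mod_two_eq_zero_or_one b with hb | hb <;> rw [ha, hb] <;> omega

theorem natOr2 (a b : Nat) : (a ||| b) % 2 = max (a % 2) (b % 2) := by
  have h := Nat.testBit_or a b 0
  simp only [Nat.testBit_zero] at h
  have key : ((a ||| b) % 2 = 1) ↔ ((a % 2 = 1) ∨ (b % 2 = 1)) := by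
    have h' : (decide ((a ||| b) % 2 = 1) = true) ↔ ((decide (a % 2 = 1) || decide (b % 2 = 1)) = true) := by rw [h]
    simpa using h'
  have h1 := Nat.mod_two_eq_zero_or_one (a ||| b)
  by_cases hc : (a ||| b) % 2 = 1
  · have h2 := key.mp hc
    omega
  · have h3 : ¬ (a % 2 = 1 ∨ b % 2 = 1) := fun hx => hc (key.mpr hx)
    omega

theorem natXor2 (a b : Nat) : (a ^^^ b) % 2 = (a % 2 + b % 2) % 2 := by
  have h := Nat.testBit_xor a b 0
  simp only [Nat.testBit_zero] at h
  have key : ((a ^^^ b) % 2 = 1) ↔ ¬((a % 2 = 1) ↔ (b % 2 = 1)) := by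
    have h' : (decide ((a ^^^ b) % 2 = 1) = true) ↔ ((decide (a % 2 = 1) ^^ decide (b % 2 = 1)) = true) := by rw [h]
    cases hA : decide (a % 2 = 1) <;> cases hB : decide (b % 2 = 1) <;> simp_all
  have h1 := Nat.mod_two_eq_zero_or_one (a ^^^ b)
  have h2 := Nat.mod_two_eq_zero_or_one a
  have h3 := Nat.mod_two_eq_zero_or_one b
  by_cases hc : (a ^^^ b) % 2 = 1
  · have h4 := key.mp hc
    by_cases h5 : a % 2 = 1
    · have h6 : ¬ b % 2 = 1 := fun hb => h4 (iff_of_true h5 hb)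
      omega
    · by_cases h6 : b % 2 = 1
      · omega
      · exact absurd (iff_of_false h5 h6) h4
  · have h4 : ((a % 2 = 1) ↔ (b % 2 = 1)) := by
      by_contra hn
      exact hc (key.mpr hn)
    by_cases h5 : a % 2 = 1
    · have := h4.mp h5; omega
    · have h6 : ¬ b % 2 = 1 := fun hb => h5 (h4.mpr hb)
      omega

theorem natAndDiv (a b : Nat) : (a &&& b) / 2 = a / 2 &&& b / 2 := by
  apply Nat.eq_of_testBit_eq; intro i
  simp [Nat.testBit_div_two, Nat.testBit_and]

theorem natOrDiv (a b : Nat) : (a ||| b) / 2 = a / 2 ||| b / 2 := by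
  apply Nat.eq_of_testBit_eq; intro i
  simp [Nat.testBit_div_two, Nat.testBit_or]

theorem natXorDiv (a b : Nat) : (a ^^^ b) / 2 = a / 2 ^^^ b / 2 := by
  apply Nat.eq_of_testBit_eq; intro i
  simp [Nat.testBit_div_two, Nat.testBit_xor]

theorem natSubmask : ∀ a b : Nat, b &&& a = b → a - b = a ^^^ b := by
  intro a
  induction a using Nat.strong_induction_on with
  | _ a ih =>
    intro b h
    rcases Nat.eq_zero_or_pos a with rfl | hpos
    · have hb : b = 0 := by
        have := Nat.and_le_right (n := b) (m := 0); omega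
      subst hb; simp
    · have hh : b / 2 &&& a / 2 = b / 2 := by
        have := congrArg (· / 2) h
        simpa [natAndDiv] using this
      have hp : b % 2 * (a % 2) = b % 2 := by
        have := congrArg (· % 2) h
        simpa [natAnd2] using this
      have hple : b % 2 ≤ a % 2 := by
        rcases Nat.mod_two_eq_zero_or_one a with ha | ha <;>
          rcases Nat.mod_two_eq_zero_or_one b with hb | hb <;>
          rw [ha, hb] at hp ⊢ <;> omega
      have hble : b ≤ a := by
        have h1 : b &&& a ≤ a := Nat.and_le_right
        omega
      have hble2 : b / 2 ≤ a / 2 := by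
        have h1 : b / 2 &&& a / 2 ≤ a / 2 := Nat.and_le_right
        omega
      have ihh : a / 2 - b / 2 = a / 2 ^^^ b / 2 :=
        ih (a / 2) (Nat.div_lt_self hpos (by omega)) (b / 2) hh
      have hx2 : (a ^^^ b) % 2 = (a % 2 + b % 2) % 2 := natXor2 a b
      have hxd : (a ^^^ b) / 2 = a / 2 ^^^ b / 2 := natXorDiv a b
      have hda := Nat.div_add_mod a 2
      have hdb := Nat.div_add_mod b 2
      have hdx := Nat.div_add_mod (a ^^^ b) 2
      have hma := Nat.mod_two_eq_zero_or_one a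
      have hmb := Nat.mod_two_eq_zero_or_one b
      omega

theorem natSubmaskAnd (m n : Nat) : (m &&& n) &&& m = m &&& n := by
  apply Nat.eq_of_testBit_eq; intro i
  simp only [Nat.testBit_and]
  cases m.testBit i <;> cases n.testBit i <;> rfl

theorem natAndSub (m n : Nat) : m - (m &&& n) = m ^^^ (m &&& n) :=
  natSubmask m (m &&& n) (natSubmaskAnd m n)

theorem natLeOr (m n : Nat) : m ≤ m ||| n := by
  have h : m &&& (m ||| n) = m := by
    apply Nat.eq_of_testBit_eq; intro i
    simp only [Nat.testBit_and, Nat.testBit_or]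
    cases m.testBit i <;> cases n.testBit i <;> rfl
  have h2 : m &&& (m ||| n) ≤ m ||| n := Nat.and_le_right
  omega

-- ---- sign-case representations of PySem.Int.band / bor ----
theorem bandOO (m n : Nat) :
    PySem.Int.band (Int.ofNat m) (Int.ofNat n) = Int.ofNat (m &&& n) := by
  simp [PySem.Int.band]

theorem bandON (m n : Nat) :
    PySem.Int.band (Int.ofNat m) (Int.negSucc n) = Int.ofNat (m ^^^ (m &&& n)) := by
  have h1 : ¬ (0 : Int) ≤ Int.negSucc n := by simp [Int.negSucc_eq]; try omega
  have h2 : (-(Int.negSucc n) - 1).toNat = n := by simp [Int.negSucc_eq]; try omega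
  simp [PySem.Int.band, h1, natAndSub]

theorem bandNO (m n : Nat) :
    PySem.Int.band (Int.negSucc m) (Int.ofNat n) = Int.ofNat (n ^^^ (n &&& m)) := by
  rw [PySem.Int.band_comm]; exact bandON n m

theorem bandNN (m n : Nat) :
    PySem.Int.band (Int.negSucc m) (Int.negSucc n) = Int.negSucc (m ||| n) := by
  have h1 : ¬ (0 : Int) ≤ Int.negSucc m := by simp [Int.negSucc_eq]; try omega
  have h2 : ¬ (0 : Int) ≤ Int.negSucc n := by simp [Int.negSucc_eq]; try omega
  have h3 : (-(Int.negSucc m) - 1).toNat = m := by simp [Int.negSucc_eq]; try omega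
  have h4 : (-(Int.negSucc n) - 1).toNat = n := by simp [Int.negSucc_eq]; try omega
  simp [PySem.Int.band, Int.negSucc_eq]; omega

theorem borOO (m n : Nat) :
    PySem.Int.bor (Int.ofNat m) (Int.ofNat n) = Int.ofNat (m ||| n) := by
  simp [PySem.Int.bor]

theorem borON (m n : Nat) :
    PySem.Int.bor (Int.ofNat m) (Int.negSucc n) = Int.negSucc (n ^^^ (n &&& m)) := by
  have h1 : ¬ (0 : Int) ≤ Int.negSucc n := by simp [Int.negSucc_eq]; try omega
  have h2 : (-(Int.negSucc n) - 1).toNat = n := by simp [Int.negSucc_eq]; try omega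
  simp [PySem.Int.bor, natAndSub, Int.negSucc_eq]; omega

theorem borNO (m n : Nat) :
    PySem.Int.bor (Int.negSucc m) (Int.ofNat n) = Int.negSucc (m ^^^ (m &&& n)) := by
  rw [PySem.Int.bor_comm]; exact borON n m

theorem borNN (m n : Nat) :
    PySem.Int.bor (Int.negSucc m) (Int.negSucc n) = Int.negSucc (m &&& n) := by
  have h1 : ¬ (0 : Int) ≤ Int.negSucc m := by simp [Int.negSucc_eq]; try omega
  have h2 : ¬ (0 : Int) ≤ Int.negSucc n := by simp [Int.negSucc_eq]; try omega
  have h3 : (-(Int.negSucc m) - 1).toNat = m := by simp [Int.negSucc_eq]; try omega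
  have h4 : (-(Int.negSucc n) - 1).toNat = n := by simp [Int.negSucc_eq]; try omega
  simp [PySem.Int.bor, Int.negSucc_eq]; omega

-- ---- floordiv / mod by 2 ----
theorem fdmodUnique (a q r : Int) (h : a = q * 2 + r) (h0 : 0 ≤ r) (h2 : r < 2) :
    PySem.Int.floordiv a 2 = q ∧ PySem.Int.mod a 2 = r := by
  have hq : PySem.Int.floordiv a 2 = q := by
    rw [PySem.Int.floordiv_eq_iff_of_pos (by omega)]
    omega
  refine ⟨hq, ?_⟩
  have := PySem.Int.floordiv_mul_add_mod a 2
  omega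

theorem fdOf (m : Nat) : PySem.Int.floordiv (Int.ofNat m) 2 = Int.ofNat (m / 2) ∧
    PySem.Int.mod (Int.ofNat m) 2 = Int.ofNat (m % 2) := by
  apply fdmodUnique
  · have := Nat.div_add_mod m 2
    simp only [Int.ofNat_eq_natCast]
    push_cast
    omega
  · exact Int.natCast_nonneg _
  · simp only [Int.ofNat_eq_natCast]
    have := Nat.mod_lt m (y := 2) (by omega)
    omega

theorem fdNeg (m : Nat) : PySem.Int.floordiv (Int.negSucc m) 2 = Int.negSucc (m / 2) ∧
    PySem.Int.mod (Int.negSucc m) 2 = 1 - (m % 2 : Int) := by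
  apply fdmodUnique
  · have := Nat.div_add_mod m 2
    have h2 := Nat.mod_lt m (y := 2) (by omega)
    simp only [Int.negSucc_eq]
    push_cast
    omega
  · have := Nat.mod_lt m (y := 2) (by omega); omega
  · omega

-- ---- halving / parity of band and bor ----
theorem half_band (x y : Int) :
    PySem.Int.floordiv (PySem.Int.band x y) 2 =
      PySem.Int.band (PySem.Int.floordiv x 2) (PySem.Int.floordiv y 2) := by
  cases x with
  | ofNat m =>
    cases y with
    | ofNat n =>
      rw [bandOO, (fdOf _).1, (fdOf _).1, (fdOf _).1, bandOO, natAndDiv]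
    | negSucc n =>
      rw [bandON, (fdOf _).1, (fdOf _).1, (fdNeg _).1, bandON, natXorDiv, natAndDiv]
  | negSucc m =>
    cases y with
    | ofNat n =>
      rw [bandNO, (fdOf _).1, (fdNeg _).1, (fdOf _).1, bandNO, natXorDiv, natAndDiv]
    | negSucc n =>
      rw [bandNN, (fdNeg _).1, (fdNeg _).1, (fdNeg _).1, bandNN, natOrDiv]

theorem par_band (x y : Int) :
    PySem.Int.mod (PySem.Int.band x y) 2 = min (PySem.Int.mod x 2) (PySem.Int.mod y 2) := by
  cases x with
  | ofNat m =>
    cases y with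
    | ofNat n =>
      rw [bandOO, (fdOf _).2, (fdOf _).2, (fdOf _).2]
      have h1 := natAnd2 m n
      simp only [Int.ofNat_eq_natCast]
      rcases Nat.mod_two_eq_zero_or_one m with hm | hm <;>
        rcases Nat.mod_two_eq_zero_or_one n with hn | hn <;>
        rw [hm, hn] at h1 <;> omega
    | negSucc n =>
      rw [bandON, (fdOf _).2, (fdOf _).2, (fdNeg _).2]
      have h1 := natXor2 m (m &&& n)
      have h2 := natAnd2 m n
      have hx := Nat.mod_two_eq_zero_or_one (m ^^^ (m &&& n))
      simp only [Int.ofNat_eq_natCast]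
      rcases Nat.mod_two_eq_zero_or_one m with hm | hm <;>
        rcases Nat.mod_two_eq_zero_or_one n with hn | hn <;>
        rw [hm, hn] at h2 <;> rw [hm] at h1 <;> omega
  | negSucc m =>
    cases y with
    | ofNat n =>
      rw [bandNO, (fdOf _).2, (fdNeg _).2, (fdOf _).2]
      have h1 := natXor2 n (n &&& m)
      have h2 := natAnd2 n m
      have hx := Nat.mod_two_eq_zero_or_one (n ^^^ (n &&& m))
      simp only [Int.ofNat_eq_natCast]
      rcases Nat.mod_two_eq_zero_or_one m with hm | hm <;>
        rcases Nat.mod_two_eq_zero_or_one n with hn | hn <;>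
        rw [hn, hm] at h2 <;> rw [hn] at h1 <;> omega
    | negSucc n =>
      rw [bandNN, (fdNeg _).2, (fdNeg _).2, (fdNeg _).2]
      have h1 := natOr2 m n
      rcases Nat.mod_two_eq_zero_or_one m with hm | hm <;>
        rcases Nat.mod_two_eq_zero_or_one n with hn | hn <;>
        rw [hm, hn] at h1 <;> omega

theorem half_bor (x y : Int) :
    PySem.Int.floordiv (PySem.Int.bor x y) 2 =
      PySem.Int.bor (PySem.Int.floordiv x 2) (PySem.Int.floordiv y 2) := by
  cases x with
  | ofNat m =>
    cases y with
    | ofNat n =>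
      rw [borOO, (fdOf _).1, (fdOf _).1, (fdOf _).1, borOO, natOrDiv]
    | negSucc n =>
      rw [borON, (fdOf _).1, (fdNeg _).1, (fdNeg _).1, borON, natXorDiv, natAndDiv]
  | negSucc m =>
    cases y with
    | ofNat n =>
      rw [borNO, (fdNeg _).1, (fdNeg _).1, (fdOf _).1, borNO, natXorDiv, natAndDiv]
    | negSucc n =>
      rw [borNN, (fdNeg _).1, (fdNeg _).1, (fdNeg _).1, borNN, natAndDiv]

theorem par_bor (x y : Int) :
    PySem.Int.mod (PySem.Int.bor x y) 2 = max (PySem.Int.mod x 2) (PySem.Int.mod y 2) := by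
  cases x with
  | ofNat m =>
    cases y with
    | ofNat n =>
      rw [borOO, (fdOf _).2, (fdOf _).2, (fdOf _).2]
      have h1 := natOr2 m n
      simp only [Int.ofNat_eq_natCast]
      rcases Nat.mod_two_eq_zero_or_one m with hm | hm <;>
        rcases Nat.mod_two_eq_zero_or_one n with hn | hn <;>
        rw [hm, hn] at h1 <;> omega
    | negSucc n =>
      rw [borON, (fdOf _).2, (fdNeg _).2, (fdNeg _).2]
      have h1 := natXor2 n (n &&& m)
      have h2 := natAnd2 n m
      have hx := Nat.mod_two_eq_zero_or_one (n ^^^ (n &&& m))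
      simp only [Int.ofNat_eq_natCast]
      rcases Nat.mod_two_eq_zero_or_one m with hm | hm <;>
        rcases Nat.mod_two_eq_zero_or_one n with hn | hn <;>
        rw [hn, hm] at h2 <;> rw [hn] at h1 <;> omega
  | negSucc m =>
    cases y with
    | ofNat n =>
      rw [borNO, (fdNeg _).2, (fdNeg _).2, (fdOf _).2]
      have h1 := natXor2 m (m &&& n)
      have h2 := natAnd2 m n
      have hx := Nat.mod_two_eq_zero_or_one (m ^^^ (m &&& n))
      simp only [Int.ofNat_eq_natCast]
      rcases Nat.mod_two_eq_zero_or_one m with hm | hm <;>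
        rcases Nat.mod_two_eq_zero_or_one n with hn | hn <;>
        rw [hm, hn] at h2 <;> rw [hm] at h1 <;> omega
    | negSucc n =>
      rw [borNN, (fdNeg _).2, (fdNeg _).2, (fdNeg _).2]
      have h1 := natAnd2 m n
      rcases Nat.mod_two_eq_zero_or_one m with hm | hm <;>
        rcases Nat.mod_two_eq_zero_or_one n with hn | hn <;>
        rw [hm, hn] at h1 <;> omega

theorem bor_ne_zero_left (x y : Int) (hx : x ≠ 0) : PySem.Int.bor x y ≠ 0 := by
  cases x with
  | ofNat m =>
    cases y with
    | ofNat n =>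
      rw [borOO]
      have hm : m ≠ 0 := by
        intro h; apply hx; simp [h]
      have := natLeOr m n
      simp only [Int.ofNat_eq_natCast, ne_eq, Int.natCast_eq_zero]
      omega
    | negSucc n => rw [borON]; simp
  | negSucc m =>
    cases y with
    | ofNat n => rw [borNO]; simp
    | negSucc n => rw [borNN]; simp

-- ---- the lowest-set-bit mask band x (-x) ----
theorem band_neg_sub_one (a : Int) : PySem.Int.band a (-a - 1) = 0 := by
  cases a with
  | ofNat m =>
    have h : -(Int.ofNat m) - 1 = Int.negSucc m := by simp [Int.negSucc_eq]; try omega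
    rw [h, bandON, Nat.and_self, Nat.xor_self]; rfl
  | negSucc m =>
    have h : -(Int.negSucc m) - 1 = Int.ofNat m := by simp [Int.negSucc_eq]
    rw [h, bandNO, Nat.and_self, Nat.xor_self]; rfl

theorem lowOdd (x : Int) (hx : PySem.Int.mod x 2 = 1) :
    PySem.Int.band x (-x) = 1 := by
  have hu := PySem.Int.floordiv_mul_add_mod x 2
  set u := PySem.Int.floordiv x 2 with hudef
  have hneg : PySem.Int.floordiv (-x) 2 = -u - 1 ∧ PySem.Int.mod (-x) 2 = 1 := by
    apply fdmodUnique; omega; omega; omega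
  have hrec := PySem.Int.floordiv_mul_add_mod (PySem.Int.band x (-x)) 2
  rw [half_band, par_band, ← hudef, hneg.1, hneg.2, hx, band_neg_sub_one] at hrec
  omega

theorem lowEven (x : Int) (hx : PySem.Int.mod x 2 = 0) :
    PySem.Int.band x (-x) =
      2 * PySem.Int.band (PySem.Int.floordiv x 2) (-(PySem.Int.floordiv x 2)) := by
  have hu := PySem.Int.floordiv_mul_add_mod x 2
  set u := PySem.Int.floordiv x 2 with hudef
  have hneg : PySem.Int.floordiv (-x) 2 = -u ∧ PySem.Int.mod (-x) 2 = 0 := by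
    apply fdmodUnique; omega; omega; omega
  have hrec := PySem.Int.floordiv_mul_add_mod (PySem.Int.band x (-x)) 2
  rw [half_band, par_band, ← hudef, hneg.1, hneg.2, hx] at hrec
  omega

theorem floordiv_two_abs_lt (x : Int) (hx : x ≠ 0) (he : PySem.Int.mod x 2 = 0) :
    (PySem.Int.floordiv x 2).natAbs < x.natAbs ∧ PySem.Int.floordiv x 2 ≠ 0 := by
  have hu := PySem.Int.floordiv_mul_add_mod x 2
  omega

theorem lowPos : ∀ (n : Nat) (x : Int), x.natAbs = n → x ≠ 0 → 0 < PySem.Int.band x (-x) := by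
  intro n
  induction n using Nat.strong_induction_on with
  | _ n ih =>
    intro x hn hx
    rcases PySem.Int.mod_two_eq x with he | ho
    · have hlt := floordiv_two_abs_lt x hx he
      have := ih (PySem.Int.floordiv x 2).natAbs (by omega) (PySem.Int.floordiv x 2) rfl hlt.2
      rw [lowEven x he]
      omega
    · rw [lowOdd x ho]; omega

theorem bitLength_one : PySem.Int.bitLength 1 = 1 := by decide

theorem bitLength_pos (z : Int) (hz : 0 < z) : 1 ≤ PySem.Int.bitLength z := by
  rw [PySem.Int.bitLength_of_pos hz]; omega

theorem bitLength_double (w : Int) (hw : 0 < w) :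
    PySem.Int.bitLength (2 * w) = PySem.Int.bitLength w + 1 := by
  have h2 : PySem.Int.floordiv (2 * w) 2 = w := by
    exact (fdmodUnique (2 * w) w 0 (by ring) (by omega) (by omega)).1
  rw [PySem.Int.bitLength_of_pos (by omega), h2]

-- the key fact: the lowest set bit of an OR is the minimum of the lowest set bits
theorem lowbit_bor : ∀ (n : Nat) (x y : Int), x.natAbs = n → x ≠ 0 → y ≠ 0 →
    PySem.Int.bitLength (PySem.Int.band (PySem.Int.bor x y) (-(PySem.Int.bor x y))) =
      min (PySem.Int.bitLength (PySem.Int.band x (-x)))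
          (PySem.Int.bitLength (PySem.Int.band y (-y))) := by
  intro n
  induction n using Nat.strong_induction_on with
  | _ n ih =>
    intro x y hn hx hy
    rcases PySem.Int.mod_two_eq x with hex | hox
    · rcases PySem.Int.mod_two_eq y with hey | hoy
      · -- both even
        have hmx := floordiv_two_abs_lt x hx hex
        have hmy := floordiv_two_abs_lt y hy hey
        set u := PySem.Int.floordiv x 2
        set v := PySem.Int.floordiv y 2
        have hbe : PySem.Int.mod (PySem.Int.bor x y) 2 = 0 := by
          rw [par_bor, hex, hey]; rfl
        have hbd : PySem.Int.floordiv (PySem.Int.bor x y) 2 = PySem.Int.bor u v :=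
          half_bor x y
        have hbne : PySem.Int.bor x y ≠ 0 := bor_ne_zero_left x y hx
        have huvne : PySem.Int.bor u v ≠ 0 := bor_ne_zero_left u v hmx.2
        have hlx := lowEven x hex
        have hly := lowEven y hey
        have hlb := lowEven (PySem.Int.bor x y) hbe
        rw [hbd] at hlb
        have hpu := lowPos u.natAbs u rfl hmx.2
        have hpv := lowPos v.natAbs v rfl hmy.2
        have hpuv := lowPos (PySem.Int.bor u v).natAbs (PySem.Int.bor u v) rfl huvne
        rw [hlx, hly, hlb, bitLength_double _ hpu, bitLength_double _ hpv,
          bitLength_double _ hpuv, ih u.natAbs (by omega) u v rfl hmx.2 hmy.2]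
        omega
      · -- y odd
        have hob : PySem.Int.mod (PySem.Int.bor x y) 2 = 1 := by
          rw [par_bor, hoy]
          rcases PySem.Int.mod_two_eq x with h | h <;> rw [h] <;> rfl
        rw [lowOdd _ hob, lowOdd _ hoy, bitLength_one]
        have hpx := lowPos x.natAbs x rfl hx
        have := bitLength_pos _ hpx
        omega
    · -- x odd
      have hob : PySem.Int.mod (PySem.Int.bor x y) 2 = 1 := by
        rw [par_bor, hox]
        rcases PySem.Int.mod_two_eq y with h | h <;> rw [h] <;> simp
      rw [lowOdd _ hob, lowOdd _ hox, bitLength_one]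
      have hpy := lowPos y.natAbs y rfl hy
      have := bitLength_pos _ hpy
      omega

-- ---- bridging A's index loop to the adjacent-pair list ----
theorem pyRange_nil (a b : Int) (h : b ≤ a) : PySem.List.pyRange a b = [] := by
  simp only [PySem.List.pyRange]
  split
  · rfl
  · have : ¬ a < b := by omega
    simp [this]

theorem foldPairsAux {β : Type} (f : β → Int → Int → β) :
    ∀ (n : Nat) (l : List Int) (j : Nat) (init : β), l.length = j + n + 1 →
    (PySem.List.pyRange (j : Int) ((l.length : Int) - 1)).foldl
        (fun r i => f r (PySem.List.pyGetD l i 0) (PySem.List.pyGetD l (i + 1) 0)) init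
      = ((l.drop j).zip (l.drop (j + 1))).foldl (fun r p => f r p.1 p.2) init := by
  intro n
  induction n with
  | zero =>
    intro l j init hlen
    rw [pyRange_nil _ _ (by omega)]
    have hdrop : l.drop (j + 1) = [] := List.drop_eq_nil_of_le (by omega)
    simp [hdrop]
  | succ n ihn =>
    intro l j init hlen
    have hj : j < l.length := by omega
    have hj1 : j + 1 < l.length := by omega
    have hg1 : PySem.List.pyGetD l (j : Int) 0 = l[j] := by
      rw [PySem.List.pyGetD_natCast, List.getD_eq_getElem?_getD, List.getElem?_eq_getElem hj]
      rfl
    have hg2 : PySem.List.pyGetD l ((j : Int) + 1) 0 = l[j + 1] := by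
      have hc : ((j : Int) + 1) = ((j + 1 : Nat) : Int) := by push_cast; ring
      rw [hc, PySem.List.pyGetD_natCast, List.getD_eq_getElem?_getD,
        List.getElem?_eq_getElem hj1]
      rfl
    have hd1 : l.drop j = l[j] :: l.drop (j + 1) := List.drop_eq_getElem_cons hj
    have hd2 : l.drop (j + 1) = l[j + 1] :: l.drop (j + 2) := List.drop_eq_getElem_cons hj1
    have hzip : (l.drop j).zip (l.drop (j + 1))
        = (l[j], l[j + 1]) :: ((l.drop (j + 1)).zip (l.drop (j + 2))) := by
      rw [hd2, hd1, hd2]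
      rfl
    rw [PySem.List.pyRange_one_cons (by omega), List.foldl_cons, hg1, hg2]
    conv_lhs => rw [show ((j : Int) + 1) = ((j + 1 : Nat) : Int) by norm_cast]
    rw [ihn l (j + 1) _ (by omega), hzip, List.foldl_cons]

theorem foldPairs {β : Type} (f : β → Int → Int → β) (l : List Int) (init : β) :
    (PySem.List.pyRange 0 ((l.length : Int) - 1)).foldl
        (fun r i => f r (PySem.List.pyGetD l i 0) (PySem.List.pyGetD l (i + 1) 0)) init
      = (l.zip l.tail).foldl (fun r p => f r p.1 p.2) init := by
  cases l with
  | nil => rw [pyRange_nil _ _ (by simp)]; rfl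
  | cons a t =>
    have h := foldPairsAux f t.length (a :: t) 0 init (by simp)
    simpa [List.drop_one] using h

-- ---- the loop invariant: running-min of positions vs OR accumulator ----
theorem invFold (s : Int) :
    ∀ (ps : List (Int × Int)) (a : Int) (r : Option Int),
    ((a = 0 ∧ r = none) ∨
      (a ≠ 0 ∧ r = some (s + (PySem.Int.bitLength (PySem.Int.band a (-a)) : Int) - 1))) →
    ((ps.foldl (fun acc p => PySem.Int.bor acc (PySem.Int.bxor p.1 p.2 >>> s.toNat)) a = 0 ∧
      ps.foldl (fun result p =>
        if PySem.Int.bxor p.1 p.2 >>> s.toNat ≠ 0 then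
          match result with
          | none => some (s + (PySem.Int.bitLength (PySem.Int.band (PySem.Int.bxor p.1 p.2 >>> s.toNat) (-(PySem.Int.bxor p.1 p.2 >>> s.toNat))) : Int) - 1)
          | some r0 =>
            if s + (PySem.Int.bitLength (PySem.Int.band (PySem.Int.bxor p.1 p.2 >>> s.toNat) (-(PySem.Int.bxor p.1 p.2 >>> s.toNat))) : Int) - 1 < r0
            then some (s + (PySem.Int.bitLength (PySem.Int.band (PySem.Int.bxor p.1 p.2 >>> s.toNat) (-(PySem.Int.bxor p.1 p.2 >>> s.toNat))) : Int) - 1)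
            else some r0
        else result) r = none) ∨
    (ps.foldl (fun acc p => PySem.Int.bor acc (PySem.Int.bxor p.1 p.2 >>> s.toNat)) a ≠ 0 ∧
      ps.foldl (fun result p =>
        if PySem.Int.bxor p.1 p.2 >>> s.toNat ≠ 0 then
          match result with
          | none => some (s + (PySem.Int.bitLength (PySem.Int.band (PySem.Int.bxor p.1 p.2 >>> s.toNat) (-(PySem.Int.bxor p.1 p.2 >>> s.toNat))) : Int) - 1)
          | some r0 =>
            if s + (PySem.Int.bitLength (PySem.Int.band (PySem.Int.bxor p.1 p.2 >>> s.toNat) (-(PySem.Int.bxor p.1 p.2 >>> s.toNat))) : Int) - 1 < r0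
            then some (s + (PySem.Int.bitLength (PySem.Int.band (PySem.Int.bxor p.1 p.2 >>> s.toNat) (-(PySem.Int.bxor p.1 p.2 >>> s.toNat))) : Int) - 1)
            else some r0
        else result) r = some (s + (PySem.Int.bitLength (PySem.Int.band
          (ps.foldl (fun acc p => PySem.Int.bor acc (PySem.Int.bxor p.1 p.2 >>> s.toNat)) a)
          (-(ps.foldl (fun acc p => PySem.Int.bor acc (PySem.Int.bxor p.1 p.2 >>> s.toNat)) a))) : Int) - 1))) := by
  intro ps
  induction ps with
  | nil => intro a r h; exact h
  | cons p ps ih =>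
    intro a r h
    simp only [List.foldl_cons]
    by_cases hx : PySem.Int.bxor p.1 p.2 >>> s.toNat = 0
    · rw [hx]
      rw [if_neg (show ¬ ((0 : Int) ≠ 0) by simp), PySem.Int.bor_zero]
      exact ih a r h
    · rw [if_pos hx]
      rcases h with ⟨ha, hr⟩ | ⟨ha, hr⟩
      · subst ha
        subst hr
        rw [PySem.Int.bor_comm, PySem.Int.bor_zero]
        exact ih _ _ (Or.inr ⟨hx, rfl⟩)
      · subst hr
        have hb : PySem.Int.bor a (PySem.Int.bxor p.1 p.2 >>> s.toNat) ≠ 0 :=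
          bor_ne_zero_left a _ ha
        apply ih
        right
        refine ⟨hb, ?_⟩
        have hmin := lowbit_bor a.natAbs a (PySem.Int.bxor p.1 p.2 >>> s.toNat) rfl ha hx
        have h1 := lowPos a.natAbs a rfl ha
        have h2 := lowPos (PySem.Int.bxor p.1 p.2 >>> s.toNat).natAbs _ rfl hx
        have hp1 := bitLength_pos _ h1
        have hp2 := bitLength_pos _ h2
        dsimp only
        split_ifs with hlt
        · rw [hmin]
          congr 2
          omega
        · rw [hmin]
          congr 2
          omega

-- foldPairs specialized to A's loop body (stated in the exact shape of the ports)
theorem foldPairsAt (keys : List Int) (start_bit : Int) :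
    (PySem.List.pyRange 0 ((keys.length : Int) - 1)).foldl
      (fun result i =>
        if PySem.Int.bxor (PySem.List.pyGetD keys i 0) (PySem.List.pyGetD keys (i + 1) 0) >>> start_bit.toNat ≠ 0 then
          match result with
          | none => some (start_bit + (PySem.Int.bitLength (PySem.Int.band (PySem.Int.bxor (PySem.List.pyGetD keys i 0) (PySem.List.pyGetD keys (i + 1) 0) >>> start_bit.toNat) (-(PySem.Int.bxor (PySem.List.pyGetD keys i 0) (PySem.List.pyGetD keys (i + 1) 0) >>> start_bit.toNat))) : Int) - 1)
          | some r0 =>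
            if start_bit + (PySem.Int.bitLength (PySem.Int.band (PySem.Int.bxor (PySem.List.pyGetD keys i 0) (PySem.List.pyGetD keys (i + 1) 0) >>> start_bit.toNat) (-(PySem.Int.bxor (PySem.List.pyGetD keys i 0) (PySem.List.pyGetD keys (i + 1) 0) >>> start_bit.toNat))) : Int) - 1 < r0
            then some (start_bit + (PySem.Int.bitLength (PySem.Int.band (PySem.Int.bxor (PySem.List.pyGetD keys i 0) (PySem.List.pyGetD keys (i + 1) 0) >>> start_bit.toNat) (-(PySem.Int.bxor (PySem.List.pyGetD keys i 0) (PySem.List.pyGetD keys (i + 1) 0) >>> start_bit.toNat))) : Int) - 1)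
            else some r0
        else result) none
    = (keys.zip keys.tail).foldl
      (fun result p =>
        if PySem.Int.bxor p.1 p.2 >>> start_bit.toNat ≠ 0 then
          match result with
          | none => some (start_bit + (PySem.Int.bitLength (PySem.Int.band (PySem.Int.bxor p.1 p.2 >>> start_bit.toNat) (-(PySem.Int.bxor p.1 p.2 >>> start_bit.toNat))) : Int) - 1)
          | some r0 =>
            if start_bit + (PySem.Int.bitLength (PySem.Int.band (PySem.Int.bxor p.1 p.2 >>> start_bit.toNat) (-(PySem.Int.bxor p.1 p.2 >>> start_bit.toNat))) : Int) - 1 < r0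
            then some (start_bit + (PySem.Int.bitLength (PySem.Int.band (PySem.Int.bxor p.1 p.2 >>> start_bit.toNat) (-(PySem.Int.bxor p.1 p.2 >>> start_bit.toNat))) : Int) - 1)
            else some r0
        else result) none :=
  foldPairs
    (fun result lo hi =>
      if PySem.Int.bxor lo hi >>> start_bit.toNat ≠ 0 then
        match result with
        | none => some (start_bit + (PySem.Int.bitLength (PySem.Int.band (PySem.Int.bxor lo hi >>> start_bit.toNat) (-(PySem.Int.bxor lo hi >>> start_bit.toNat))) : Int) - 1)
        | some r0 =>
          if start_bit + (PySem.Int.bitLength (PySem.Int.band (PySem.Int.bxor lo hi >>> start_bit.toNat) (-(PySem.Int.bxor lo hi >>> start_bit.toNat))) : Int) - 1 < r0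
          then some (start_bit + (PySem.Int.bitLength (PySem.Int.band (PySem.Int.bxor lo hi >>> start_bit.toNat) (-(PySem.Int.bxor lo hi >>> start_bit.toNat))) : Int) - 1)
          else some r0
      else result) keys none

-- ===== VERDICT (by name: the statement is the Claim_ definition above) =====
theorem first_split_py_spec : Claim_equal_first_split_py := by
  intro keys start_bit _hdom _hpre
  unfold Spec_first_split_py first_split_py first_split_py_alt
  rw [PySem.List.slice_from_one]
  simp only [PySem.List.len_eq]
  have hb := foldPairsAt keys start_bit
  rw [hb]
  have hinv := invFold start_bit (keys.zip keys.tail) 0 none (Or.inl ⟨rfl, rfl⟩)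
  rcases hinv with ⟨h0, hr⟩ | ⟨h0, hr⟩
  · rw [hr, if_pos h0]
  · rw [hr, if_neg h0]
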